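-- pv_equiv track=rewrite | github.com/openmc-dev/openmc | tests/regression_tests/random_ray_cube/test.py | fill_cube
-- ===== SOURCE A (Python) =====
-- def fill_cube(N, n_1, n_2, fill_1, fill_2, fill_3):
--     cube = [[[0 for _ in range(N)] for _ in range(N)] for _ in range(N)]
--     for i in range(N):
--         for j in range(N):
--             for k in range(N):
--                 if i < n_1 and j >= (N-n_1) and k < n_1:
--                     cube[i][j][k] = fill_1
--                 elif i < n_2 and j >= (N-n_2) and k < n_2:
--                     cube[i][j][k] = fill_2
--                 else:
--                     cube[i][j][k] = fill_3
--     return cube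
-- ===== SOURCE B (Python) =====
-- def fill_cube(N, n_1, n_2, fill_1, fill_2, fill_3):
--     cube = [[[fill_3 for _ in range(N)] for _ in range(N)] for _ in range(N)]
--
--     def paint(n, fill):
--         # overwrite the n x n x n corner box (low i, high j, low k) with `fill`
--         for i in range(min(n, N)):
--             for j in range(max(N - n, 0), N):
--                 for k in range(min(n, N)):
--                     cube[i][j][k] = fill
--
--     paint(n_2, fill_2)
--     paint(n_1, fill_1)  # region 1 painted last: it wins where the boxes overlap
--     return cube
-- ===== Notes on version B (the rewrite author's own statement) =====
-- stated objective: simpler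
-- what changed: A decides every cell of the N^3 triple loop with an if/elif chain; B builds the cube pre-filled with fill_3 once and then overwrites only the two corner boxes (region 2 first, region 1 last so it wins on overlap), with loop bounds clamped to [0,N).
import Mathlib
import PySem

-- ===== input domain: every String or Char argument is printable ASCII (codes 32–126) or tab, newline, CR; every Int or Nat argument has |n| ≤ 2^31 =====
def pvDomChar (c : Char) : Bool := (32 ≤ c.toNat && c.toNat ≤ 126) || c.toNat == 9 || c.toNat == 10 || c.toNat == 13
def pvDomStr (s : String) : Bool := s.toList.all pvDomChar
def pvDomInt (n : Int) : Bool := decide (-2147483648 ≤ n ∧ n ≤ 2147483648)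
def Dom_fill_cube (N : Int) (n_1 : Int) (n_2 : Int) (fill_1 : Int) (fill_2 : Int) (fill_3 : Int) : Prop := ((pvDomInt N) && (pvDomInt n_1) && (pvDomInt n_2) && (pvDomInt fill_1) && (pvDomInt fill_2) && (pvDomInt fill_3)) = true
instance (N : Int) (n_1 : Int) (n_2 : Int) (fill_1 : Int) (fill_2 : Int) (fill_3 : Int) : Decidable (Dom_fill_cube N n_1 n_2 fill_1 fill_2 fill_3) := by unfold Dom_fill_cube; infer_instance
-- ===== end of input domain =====

-- B replaces A's per-cell if/elif chain over the whole N^3 loop by building a cube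
-- pre-filled with fill_3 and overwriting only the two corner boxes (region 2, then
-- region 1 last so it wins on overlap); objective: simpler. Both Pythons mutate only
-- the freshly built list, no argument is mutated.


-- ===== PORT A =====
-- cube[i][j][k] = v ; both programs use it only with indices that are in range and
-- nonnegative, where List.modify/List.set is exactly Python's element assignment
def pySet3 (c : List (List (List Int))) (i j k v : Int) : List (List (List Int)) :=
  c.modify i.toNat (fun p => p.modify j.toNat (fun r => r.set k.toNat v))

def fill_cube (N : Int) (n_1 : Int) (n_2 : Int) (fill_1 : Int) (fill_2 : Int) (fill_3 : Int) : List (List (List Int)) :=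
  let cube := (PySem.List.pyRange 0 N 1).map (fun _ =>
    (PySem.List.pyRange 0 N 1).map (fun _ =>
      (PySem.List.pyRange 0 N 1).map (fun _ => (0 : Int))))
  (PySem.List.pyRange 0 N 1).foldl (fun cube i =>
    (PySem.List.pyRange 0 N 1).foldl (fun cube j =>
      (PySem.List.pyRange 0 N 1).foldl (fun cube k =>
        if i < n_1 ∧ j ≥ N - n_1 ∧ k < n_1 then pySet3 cube i j k fill_1
        else if i < n_2 ∧ j ≥ N - n_2 ∧ k < n_2 then pySet3 cube i j k fill_2
        else pySet3 cube i j k fill_3) cube) cube) cube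

-- ===== PORT B =====
-- overwrite the n×n×n corner box (low i, high j, low k) with `fill`
def pvPaint (N n fill : Int) (cube0 : List (List (List Int))) : List (List (List Int)) :=
  (PySem.List.pyRange 0 (min n N) 1).foldl (fun cube i =>
    (PySem.List.pyRange (max (N - n) 0) N 1).foldl (fun cube j =>
      (PySem.List.pyRange 0 (min n N) 1).foldl (fun cube k =>
        pySet3 cube i j k fill) cube) cube) cube0

def fill_cube_alt (N : Int) (n_1 : Int) (n_2 : Int) (fill_1 : Int) (fill_2 : Int) (fill_3 : Int) : List (List (List Int)) :=
  let cube := (PySem.List.pyRange 0 N 1).map (fun _ =>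
    (PySem.List.pyRange 0 N 1).map (fun _ =>
      (PySem.List.pyRange 0 N 1).map (fun _ => fill_3)))
  pvPaint N n_1 fill_1 (pvPaint N n_2 fill_2 cube)

-- ===== PRECONDITION & SPEC =====
def Spec_fill_cube (N : Int) (n_1 : Int) (n_2 : Int) (fill_1 : Int) (fill_2 : Int) (fill_3 : Int) (out : List (List (List Int))) : Prop := out = fill_cube_alt N n_1 n_2 fill_1 fill_2 fill_3
instance (N : Int) (n_1 : Int) (n_2 : Int) (fill_1 : Int) (fill_2 : Int) (fill_3 : Int) (out : List (List (List Int))) : Decidable (Spec_fill_cube N n_1 n_2 fill_1 fill_2 fill_3 out) := by unfold Spec_fill_cube; infer_instance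

-- ===== CLAIM (what is proved, stated in full; the proofs are below) =====
def Claim_equal_fill_cube : Prop := ∀ (N : Int) (n_1 : Int) (n_2 : Int) (fill_1 : Int) (fill_2 : Int) (fill_3 : Int), Dom_fill_cube N n_1 n_2 fill_1 fill_2 fill_3 → Spec_fill_cube N n_1 n_2 fill_1 fill_2 fill_3 (fill_cube N n_1 n_2 fill_1 fill_2 fill_3)

-- ===== LEMMAS AND PROOFS =====

-- the cube of side M whose cell (i,j,k) holds w i j k
def pvCanon (M : Nat) (w : Nat → Nat → Nat → Int) : List (List (List Int)) :=
  (List.range M).map (fun i => (List.range M).map (fun j => (List.range M).map (fun k => w i j k)))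

-- a fold whose every step modifies the SAME index i is a single modify at i
theorem pvFocus {ι α : Type} (L : List ι) (i : Nat) (h : ι → α → α) (c : List α) :
    L.foldl (fun c x => c.modify i (h x)) c = c.modify i (fun r => L.foldl (fun r x => h x r) r) := by
  induction L generalizing c with
  | nil =>
      refine (List.ext_getElem (by simp) ?_).symm
      intro m h1 h2
      simp [List.getElem_modify]
  | cons a t ih =>
      simp only [List.foldl_cons, ih, List.modify_modify_eq, Function.comp_def]

-- fold of modifies over range' lo cnt: every index is touched once
theorem pvPaintWin {α : Type} (g : Nat → α → α) :
    ∀ (cnt lo : Nat) (l : List α), (lo + cnt ≤ l.length ∨ cnt = 0) →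
    (List.range' lo cnt).foldl (fun a idx => a.modify idx (g idx)) l
      = l.mapIdx (fun idx x => if lo ≤ idx ∧ idx < lo + cnt then g idx x else x) := by
  intro cnt
  induction cnt with
  | zero =>
      intro lo l _
      apply List.ext_getElem (by simp)
      intro m h1 h2
      simp only [List.getElem_mapIdx, List.range']
      rw [if_neg (by omega)]
      simp
  | succ cnt ih =>
      intro lo l h
      have hlen : lo + (cnt + 1) ≤ l.length := by
        rcases h with h | h
        · exact h
        · omega
      rw [List.range'_succ, List.foldl_cons,
        ih (lo + 1) (l.modify lo (g lo)) (by simp; omega)]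
      apply List.ext_getElem (by simp)
      intro m h1 h2
      simp only [List.getElem_mapIdx, List.getElem_modify]
      split_ifs <;> subst_vars <;> first | rfl | omega

-- range(a,b) for 0 ≤ a, as Nat indices
theorem pvRangeCast (a b : Int) (ha : 0 ≤ a) :
    PySem.List.pyRange a b 1 = (List.range' a.toNat (b - a).toNat).map (Nat.cast : Nat → Int) := by
  apply List.ext_getElem (by simp [PySem.List.length_pyRange_one])
  intro m h1 h2
  rw [PySem.List.getElem_pyRange_one]
  simp only [List.getElem_map, List.getElem_range']
  omega

-- fold of modifies over a Python range, on the Int side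
theorem pvPaintPy {α : Type} (a b : Int) (ha : 0 ≤ a) (F : Int → α → α) (l : List α)
    (h : b ≤ (l.length : Int) ∨ b ≤ a) :
    (PySem.List.pyRange a b 1).foldl (fun l x => l.modify x.toNat (F x)) l
      = l.mapIdx (fun m y => if a ≤ (m : Int) ∧ (m : Int) < b then F (m : Int) y else y) := by
  rw [pvRangeCast a b ha, List.foldl_map]
  have e : (fun (l : List α) (m : Nat) => l.modify ((m : Int)).toNat (F (m : Int)))
      = fun (l : List α) (m : Nat) => l.modify m ((fun (m : Nat) y => F (m : Int) y) m) := by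
    funext l m; simp
  rw [e, pvPaintWin (fun (m : Nat) y => F (m : Int) y) ((b - a).toNat) a.toNat l (by omega)]
  apply List.ext_getElem (by simp)
  intro m h1 h2
  simp only [List.getElem_mapIdx]
  by_cases hw : a.toNat ≤ m ∧ m < a.toNat + (b - a).toNat
  · rw [if_pos hw, if_pos (by omega)]
  · rw [if_neg hw, if_neg (by omega)]

-- one triple loop writing v i j k into the cells of a box, run on a canonical cube
theorem pvTrip (M : Nat) (w : Nat → Nat → Nat → Int) (ia ib ja jb ka kb : Int)
    (v : Int → Int → Int → Int)
    (hia : 0 ≤ ia) (hja : 0 ≤ ja) (hka : 0 ≤ ka)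
    (hib : ib ≤ (M : Int) ∨ ib ≤ ia) (hjb : jb ≤ (M : Int) ∨ jb ≤ ja)
    (hkb : kb ≤ (M : Int) ∨ kb ≤ ka) :
    (PySem.List.pyRange ia ib 1).foldl (fun c i =>
      (PySem.List.pyRange ja jb 1).foldl (fun c j =>
        (PySem.List.pyRange ka kb 1).foldl (fun c k =>
          pySet3 c i j k (v i j k)) c) c) (pvCanon M w)
    = pvCanon M (fun i j k =>
        if (ia ≤ (i : Int) ∧ (i : Int) < ib) ∧ (ja ≤ (j : Int) ∧ (j : Int) < jb)
            ∧ (ka ≤ (k : Int) ∧ (k : Int) < kb) then v (i : Int) (j : Int) (k : Int) else w i j k) := by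
  have h1 : ∀ (c : List (List (List Int))) (i j : Int),
      (PySem.List.pyRange ka kb 1).foldl (fun c k => pySet3 c i j k (v i j k)) c
      = c.modify i.toNat (fun p => p.modify j.toNat (fun r =>
          (PySem.List.pyRange ka kb 1).foldl (fun r k => r.modify k.toNat (fun _ => v i j k)) r)) := by
    intro c i j
    unfold pySet3
    rw [pvFocus (PySem.List.pyRange ka kb 1) i.toNat
      (fun k p => p.modify j.toNat (fun r => r.set k.toNat (v i j k))) c]
    congr 1
    funext p
    rw [pvFocus (PySem.List.pyRange ka kb 1) j.toNat
      (fun k r => r.set k.toNat (v i j k)) p]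
    simp [List.set_eq_modify]
  simp only [h1]
  have h2 : ∀ (c : List (List (List Int))) (i : Int),
      (PySem.List.pyRange ja jb 1).foldl (fun c j => c.modify i.toNat (fun p => p.modify j.toNat (fun r =>
          (PySem.List.pyRange ka kb 1).foldl (fun r k => r.modify k.toNat (fun _ => v i j k)) r))) c
      = c.modify i.toNat (fun p => (PySem.List.pyRange ja jb 1).foldl (fun p j => p.modify j.toNat (fun r =>
          (PySem.List.pyRange ka kb 1).foldl (fun r k => r.modify k.toNat (fun _ => v i j k)) r)) p) := by
    intro c i
    exact pvFocus (PySem.List.pyRange ja jb 1) i.toNat _ c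
  simp only [h2]
  rw [pvPaintPy ia ib hia _ (pvCanon M w) (by simp [pvCanon]; omega)]
  apply List.ext_getElem (by simp [pvCanon])
  intro i hi1 hi2
  have hiM : i < M := by simpa [pvCanon] using hi2
  simp only [List.getElem_mapIdx, pvCanon, List.getElem_map, List.getElem_range]
  by_cases hwi : ia ≤ (i : Int) ∧ (i : Int) < ib
  · rw [if_pos hwi]
    rw [pvPaintPy ja jb hja _ _ (by simp; omega)]
    apply List.ext_getElem (by simp)
    intro j hj1 hj2
    have hjM : j < M := by simpa using hj2
    simp only [List.getElem_mapIdx, List.getElem_map, List.getElem_range]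
    by_cases hwj : ja ≤ (j : Int) ∧ (j : Int) < jb
    · rw [if_pos hwj]
      rw [pvPaintPy ka kb hka _ _ (by simp; omega)]
      apply List.ext_getElem (by simp)
      intro k hk1 hk2
      have hkM : k < M := by simpa using hk2
      simp only [List.getElem_mapIdx, List.getElem_map, List.getElem_range]
      by_cases hwk : ka ≤ (k : Int) ∧ (k : Int) < kb
      · rw [if_pos hwk, if_pos ⟨hwi, hwj, hwk⟩]
      · rw [if_neg hwk, if_neg (by tauto)]
    · rw [if_neg hwj]
      apply List.ext_getElem (by simp)
      intro k hk1 hk2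
      simp only [List.getElem_map, List.getElem_range]
      rw [if_neg (by tauto)]
  · rw [if_neg hwi]
    apply List.ext_getElem (by simp)
    intro j hj1 hj2
    simp only [List.getElem_map, List.getElem_range]
    apply List.ext_getElem (by simp)
    intro k hk1 hk2
    simp only [List.getElem_map, List.getElem_range]
    rw [if_neg (by tauto)]

-- [X for _ in range(N)] as a map over Nat indices
theorem pvConstMap {α : Type} (N : Int) (X : α) :
    (PySem.List.pyRange 0 N 1).map (fun _ => X) = (List.range N.toNat).map (fun _ => X) := by
  rw [pvRangeCast 0 N le_rfl, List.map_map, List.range'_eq_map_range, List.map_map]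
  simp only [Int.sub_zero]
  exact List.map_congr_left (fun _ _ => rfl)

theorem pvCanon_congr (M : Nat) (w w' : Nat → Nat → Nat → Int)
    (h : ∀ i j k, i < M → j < M → k < M → w i j k = w' i j k) :
    pvCanon M w = pvCanon M w' := by
  unfold pvCanon
  apply List.map_congr_left; intro i hi
  apply List.map_congr_left; intro j hj
  apply List.map_congr_left; intro k hk
  exact h i j k (List.mem_range.mp hi) (List.mem_range.mp hj) (List.mem_range.mp hk)

-- A computes every cell from the if/elif chain
theorem fill_cube_eq_canon (N n_1 n_2 fill_1 fill_2 fill_3 : Int) :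
    fill_cube N n_1 n_2 fill_1 fill_2 fill_3
      = pvCanon N.toNat (fun i j k =>
          if (0 ≤ (i:Int) ∧ (i:Int) < N) ∧ (0 ≤ (j:Int) ∧ (j:Int) < N) ∧ (0 ≤ (k:Int) ∧ (k:Int) < N) then
            (if (i:Int) < n_1 ∧ (j:Int) ≥ N - n_1 ∧ (k:Int) < n_1 then fill_1
             else if (i:Int) < n_2 ∧ (j:Int) ≥ N - n_2 ∧ (k:Int) < n_2 then fill_2
             else fill_3)
          else 0) := by
  unfold fill_cube
  have hpush : ∀ (c : List (List (List Int))) (i j k : Int),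
      (if i < n_1 ∧ j ≥ N - n_1 ∧ k < n_1 then pySet3 c i j k fill_1
       else if i < n_2 ∧ j ≥ N - n_2 ∧ k < n_2 then pySet3 c i j k fill_2
       else pySet3 c i j k fill_3)
      = pySet3 c i j k (if i < n_1 ∧ j ≥ N - n_1 ∧ k < n_1 then fill_1
         else if i < n_2 ∧ j ≥ N - n_2 ∧ k < n_2 then fill_2 else fill_3) := by
    intro c i j k; split_ifs <;> rfl
  simp only [hpush, pvConstMap]
  have hinit : (List.range N.toNat).map (fun _ =>
      (List.range N.toNat).map (fun _ => (List.range N.toNat).map (fun _ => (0:Int))))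
      = pvCanon N.toNat (fun _ _ _ => 0) := rfl
  rw [hinit, pvTrip N.toNat (fun _ _ _ => 0) 0 N 0 N 0 N _ le_rfl le_rfl le_rfl
    (by omega) (by omega) (by omega)]

-- B's paint overwrites exactly the clamped box
theorem pvPaint_canon (M : Nat) (N n fill : Int) (w : Nat → Nat → Nat → Int)
    (hN : N ≤ (M : Int)) :
    pvPaint N n fill (pvCanon M w)
      = pvCanon M (fun i j k =>
          if (0 ≤ (i:Int) ∧ (i:Int) < min n N) ∧ (max (N - n) 0 ≤ (j:Int) ∧ (j:Int) < N)
              ∧ (0 ≤ (k:Int) ∧ (k:Int) < min n N) then fill else w i j k) := by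
  unfold pvPaint
  rw [pvTrip M w 0 (min n N) (max (N - n) 0) N 0 (min n N) (fun _ _ _ => fill)
    le_rfl (le_max_right _ _) le_rfl (by omega) (by omega) (by omega)]

theorem pvFinal (N n_1 n_2 fill_1 fill_2 fill_3 : Int) :
    fill_cube N n_1 n_2 fill_1 fill_2 fill_3 = fill_cube_alt N n_1 n_2 fill_1 fill_2 fill_3 := by
  have hMN : N ≤ (N.toNat : Int) := Int.self_le_toNat N
  have halt : fill_cube_alt N n_1 n_2 fill_1 fill_2 fill_3
      = pvPaint N n_1 fill_1 (pvPaint N n_2 fill_2 (pvCanon N.toNat (fun _ _ _ => fill_3))) := by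
    unfold fill_cube_alt
    simp only [pvConstMap]
    rfl
  rw [fill_cube_eq_canon, halt, pvPaint_canon N.toNat N n_2 fill_2 _ hMN,
    pvPaint_canon N.toNat N n_1 fill_1 _ hMN]
  apply pvCanon_congr
  intro i j k hi hj hk
  have h0 : (0 ≤ (i:Int) ∧ (i:Int) < N) ∧ (0 ≤ (j:Int) ∧ (j:Int) < N) ∧ (0 ≤ (k:Int) ∧ (k:Int) < N) := by
    refine ⟨⟨by omega, by omega⟩, ⟨by omega, by omega⟩, by omega, by omega⟩
  rw [if_pos h0]
  split_ifs <;> first | rfl | omega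

-- ===== VERDICT (by name: the statement is the Claim_ definition above) =====
theorem fill_cube_spec : Claim_equal_fill_cube := by
  intro N n_1 n_2 fill_1 fill_2 fill_3 _
  unfold Spec_fill_cube
  exact pvFinal N n_1 n_2 fill_1 fill_2 fill_3
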